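-- pv_equiv track=rewrite | github.com/ZChyu/jt_sonar_0819 | data_preprocess.py | zeroSupplement
-- ===== SOURCE A (Python) =====
-- import copy
--
-- def zeroSupplement(data):
--     frequency_set = []
--     for i in range(len(data)):
--         for j in range(len(data[i])):
--             if data[i][j][0] not in frequency_set:
--                 frequency_set.append(data[i][j][0])
--     frequency_set = sorted(set(frequency_set))
--     data_zero_lofar = []
--
--     for k in range(len(frequency_set)):
--         data_zero_lofar.append([frequency_set[k], 0])
--
--     for m in range(len(data)):
--         temp = copy.deepcopy(data_zero_lofar)
--         for n in range(len(data[m])):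
--             lofar_index = frequency_set.index(data[m][n][0])
--             temp[lofar_index] = data[m][n]
--         data[m] = temp
--     return data
-- ===== SOURCE B (Python) =====
-- def zeroSupplement(data):
--     grid = sorted({pair[0] for row in data for pair in row})
--     for m, row in enumerate(data):
--         srow = sorted(row, key=lambda pair: pair[0])  # stable: equal keys keep row order
--         padded = []
--         i = 0
--         for f in grid:
--             chosen = None
--             while i < len(srow) and srow[i][0] == f:
--                 chosen = srow[i]
--                 i += 1
--             padded.append(chosen if chosen is not None else [f, 0])
--         data[m] = padded
--     return data
-- ===== Notes on version B (the rewrite author's own statement) =====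
-- stated objective: alternative
-- what changed: A scatters each row's pairs into a deep-copied zero template via repeated list.index; B stably sorts each row by frequency and merges it two-pointer-style against the sorted grid, emitting the last matching pair or a fresh [f,0] per grid slot.
import Mathlib
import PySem

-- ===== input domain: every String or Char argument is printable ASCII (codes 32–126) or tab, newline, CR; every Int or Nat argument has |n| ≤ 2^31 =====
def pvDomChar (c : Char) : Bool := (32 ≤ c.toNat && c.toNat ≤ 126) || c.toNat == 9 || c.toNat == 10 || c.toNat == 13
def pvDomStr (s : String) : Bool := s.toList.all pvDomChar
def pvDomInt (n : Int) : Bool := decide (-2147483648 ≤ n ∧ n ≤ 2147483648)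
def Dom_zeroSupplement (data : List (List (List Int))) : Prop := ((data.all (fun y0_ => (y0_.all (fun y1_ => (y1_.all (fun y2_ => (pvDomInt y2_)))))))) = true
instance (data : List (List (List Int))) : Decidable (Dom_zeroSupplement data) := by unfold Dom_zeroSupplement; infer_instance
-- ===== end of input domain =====

-- B replaces A's scatter-into-a-deepcopied-zero-template (repeated list.index) by a
-- sort-then-merge: each row is stably sorted by frequency and merged two-pointer-style
-- against the sorted grid; same return value (both Pythons also rebind data[m] in place
-- the same way; equivalence here is about the return value).


-- ===== PORT A =====
-- p[0]: exact (= headD 0) on Pre_, which requires every inner pair nonempty (Python raises IndexError otherwise)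
def zsHead (p : List Int) : Int := p.headD 0

def zeroSupplement (data : List (List (List Int))) : List (List (List Int)) :=
  let fs0 : List Int :=
    data.foldl (fun acc row =>
      row.foldl (fun acc p => if zsHead p ∈ acc then acc else acc ++ [zsHead p]) acc) []
  let fs : List Int := PySem.List.sorted (PySem.Set.ofList fs0) (fun x => x) false
  let template : List (List Int) := fs.map (fun f => [f, 0])
  data.map (fun row =>
    row.foldl (fun temp p =>
      match PySem.List.index? fs (zsHead p) with
      | some i => temp.set i p      -- temp[lofar_index] = data[m][n]; index is in range by construction
      | none => temp)               -- unreachable: every frequency of a row is in fs by construction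
      template)

-- ===== PORT B =====
-- the 'while i < len(srow) and srow[i][0] == f' loop: consume the leading pairs with head f,
-- remembering the last one seen ('chosen')
def zsTake (f : Int) : List (List Int) → Option (List Int) → Option (List Int) × List (List Int)
  | [], chosen => (chosen, [])
  | p :: t, chosen => if zsHead p == f then zsTake f t (some p) else (chosen, p :: t)

-- the 'for f in grid' loop: one merge step per grid frequency, threading the unconsumed suffix
def zsMerge : List Int → List (List Int) → List (List Int)
  | [], _ => []
  | f :: gs, srow =>
    let (chosen, rest) := zsTake f srow none
    (match chosen with | some p => p | none => [f, 0]) :: zsMerge gs rest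

def zeroSupplement_alt (data : List (List (List Int))) : List (List (List Int)) :=
  let grid : List Int :=
    PySem.List.sorted (PySem.Set.ofList (data.flatMap (fun row => row.map zsHead))) (fun x => x) false
  data.map (fun row => zsMerge grid (PySem.List.sorted row (fun p => zsHead p) false))

-- ===== PRECONDITION & SPEC =====
-- Pre_ excludes inputs containing an empty inner pair: there Python A (and B) raise IndexError on pair[0].
def Pre_zeroSupplement (data : List (List (List Int))) : Prop :=
  ∀ row ∈ data, ∀ p ∈ row, p ≠ []
instance (data : List (List (List Int))) : Decidable (Pre_zeroSupplement data) := by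
  unfold Pre_zeroSupplement; infer_instance
def pvWitness_zeroSupplement : List (List (List Int)) := [[[1, 5], [3, 7]], [[3, 9]]]

def Spec_zeroSupplement (data : List (List (List Int))) (out : List (List (List Int))) : Prop := out = zeroSupplement_alt data
instance (data : List (List (List Int))) (out : List (List (List Int))) : Decidable (Spec_zeroSupplement data out) := by unfold Spec_zeroSupplement; infer_instance

-- ===== CLAIM (what is proved, stated in full; the proofs are below) =====
def Claim_equal_zeroSupplement : Prop := ∀ (data : List (List (List Int))), Dom_zeroSupplement data → Pre_zeroSupplement data → Spec_zeroSupplement data (zeroSupplement data)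

-- ===== LEMMAS AND PROOFS =====

-- A's dedup loop is set-update with the heads, in order
theorem zs_fold_eq_update (data : List (List (List Int))) (s : PySem.Set Int) :
    data.foldl (fun acc row =>
      row.foldl (fun acc p => if zsHead p ∈ acc then acc else acc ++ [zsHead p]) acc) s
    = PySem.Set.update s (data.flatMap (fun row => row.map zsHead)) := by
  induction data generalizing s with
  | nil => simp [PySem.Set.update]
  | cons row t ih =>
    simp only [List.foldl_cons, List.flatMap_cons]
    rw [ih]
    have hrow : row.foldl (fun acc p => if zsHead p ∈ acc then acc else acc ++ [zsHead p]) s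
        = PySem.Set.update s (row.map zsHead) := by
      rw [PySem.Set.update_map_eq_foldl_add]
      simp only [PySem.Set.add_eq_ite]
    rw [hrow, PySem.Set.update_append]

-- setting the slot found by list.index on a mapped nodup list updates the function at that key
theorem zs_set_map (G : List Int) (a : Int) (k : Nat) (g : Int → List Int) (p : List Int)
    (hnd : G.Nodup) (hk : PySem.List.index? G a = some k) :
    (G.map g).set k p = G.map (fun f => if f = a then p else g f) := by
  induction G generalizing k with
  | nil => simp [PySem.List.index?] at hk
  | cons x t ih =>
    rcases List.nodup_cons.mp hnd with ⟨hx, hnt⟩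
    by_cases hxa : x = a
    · subst hxa
      rw [PySem.List.index?_cons_self] at hk
      cases hk
      simp only [List.map_cons, List.set]
      congr 1
      apply List.map_congr_left
      intro f hf
      have : f ≠ x := fun h => hx (h ▸ hf)
      simp [this]
    · rw [PySem.List.index?_cons_of_ne (xs := t) hxa] at hk
      rcases Option.map_eq_some_iff.mp hk with ⟨j, hj, rfl⟩
      simp only [List.map_cons, List.set]
      rw [ih j hnt hj, if_neg hxa]

-- scatter over a row starting from a template that agrees with a dict equals the gather from the dict
theorem zs_scatter_eq_gather (G : List Int) (hnd : G.Nodup) (r : List (List Int))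
    (hr : ∀ p ∈ r, zsHead p ∈ G) (g : Int → List Int) (d : PySem.Dict Int (List Int))
    (hgd : ∀ f ∈ G, g f = d.getD f [f, 0]) :
    r.foldl (fun temp p =>
      match PySem.List.index? G (zsHead p) with
      | some i => temp.set i p
      | none => temp) (G.map g)
    = G.map (fun f => (r.foldl (fun d p => d.insert (zsHead p) p) d).getD f [f, 0]) := by
  induction r generalizing g d with
  | nil =>
    simp only [List.foldl_nil]
    exact List.map_congr_left hgd
  | cons p r ih =>
    have hp : zsHead p ∈ G := hr p (List.mem_cons_self ..)
    rcases (PySem.List.index?_isSome_iff (xs := G) (v := zsHead p)).mpr hp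
      |> Option.isSome_iff_exists.mp with ⟨k, hk⟩
    simp only [List.foldl_cons, hk]
    rw [zs_set_map G (zsHead p) k g p hnd hk]
    exact ih (fun q hq => hr q (List.mem_cons_of_mem _ hq))
      (fun f => if f = zsHead p then p else g f) (d.insert (zsHead p) p)
      (by
        intro f hf
        rw [PySem.Dict.getD_insert]
        dsimp only
        split_ifs with h
        · rfl
        · exact hgd f hf)

-- the dict built by last-wins insertion reads back as the LAST matching pair of the list
theorem zs_getD_foldl_insert (l : List (List Int)) (d : PySem.Dict Int (List Int))
    (f : Int) (dflt : List Int) :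
    (l.foldl (fun d p => d.insert (zsHead p) p) d).getD f dflt
    = ((l.filter (fun p => zsHead p == f)).getLast?).getD (d.getD f dflt) := by
  induction l generalizing d with
  | nil => simp
  | cons p t ih =>
    simp only [List.foldl_cons, List.filter_cons]
    rw [ih]
    by_cases h : zsHead p = f
    · simp only [h, BEq.rfl, if_true, List.getLast?_cons, Option.getD_some]
      rw [PySem.Dict.getD_insert, if_pos rfl]
    · have hb : (zsHead p == f) = false := by simp [h]
      rw [hb, if_neg (by simp), PySem.Dict.getD_insert, if_neg (fun hh => h hh.symm)]

-- inserting into a key-sorted list: the filter at an exact key value grows at the back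
theorem zs_insertBy_filter (f : Int) (x : List Int) (ys : List (List Int))
    (hs : ys.Pairwise (fun a b => zsHead a ≤ zsHead b)) :
    (PySem.List.insertBy (fun a b => decide (zsHead a < zsHead b)) x ys).filter
        (fun p => zsHead p == f)
    = ys.filter (fun p => zsHead p == f) ++ (if zsHead x == f then [x] else []) := by
  induction ys with
  | nil =>
    simp only [PySem.List.insertBy, List.filter_cons, List.filter_nil, List.nil_append]
  | cons y t ih =>
    rcases List.pairwise_cons.mp hs with ⟨hy, ht⟩
    simp only [PySem.List.insertBy]
    by_cases hlt : decide (zsHead x < zsHead y) = true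
    · -- x inserted before y: then every element of y :: t has head > zsHead x
      rw [if_pos hlt]
      have hlt' : zsHead x < zsHead y := of_decide_eq_true hlt
      have hnil : zsHead x = f → (y :: t).filter (fun p => zsHead p == f) = [] := by
        intro hxf
        apply List.filter_eq_nil_iff.mpr
        intro p hp
        have : zsHead x < zsHead p := by
          rcases List.mem_cons.mp hp with rfl | hpt
          · exact hlt'
          · exact lt_of_lt_of_le hlt' (hy p hpt)
        simp only [beq_iff_eq]
        omega
      by_cases hx : (zsHead x == f) = true
      · rw [List.filter_cons, if_pos hx, hnil (by simpa using hx), if_pos hx]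
        rfl
      · rw [List.filter_cons, if_neg hx, if_neg hx, List.append_nil]
    · rw [if_neg hlt, List.filter_cons, List.filter_cons, ih ht]
      by_cases hy' : (zsHead y == f) = true
      · rw [if_pos hy', if_pos hy', List.cons_append]
      · rw [if_neg hy', if_neg hy']

-- STABILITY at an exact key value: sorting by head does not change the filter at one head
theorem zs_sorted_filter (f : Int) (row : List (List Int)) :
    (PySem.List.sorted row (fun p => zsHead p) false).filter (fun p => zsHead p == f)
    = row.filter (fun p => zsHead p == f) := by
  induction row using List.reverseRecOn with
  | nil => simp [PySem.List.sorted_eq_foldl_insertBy]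
  | append_singleton xs x ih =>
    have hstep : PySem.List.sorted (xs ++ [x]) (fun p => zsHead p) false
        = PySem.List.insertBy (fun a b => decide (zsHead a < zsHead b)) x
            (PySem.List.sorted xs (fun p => zsHead p) false) := by
      rw [PySem.List.sorted_eq_foldl_insertBy, PySem.List.sorted_eq_foldl_insertBy,
        List.foldl_append, List.foldl_cons, List.foldl_nil]
    rw [hstep, zs_insertBy_filter f x _ (PySem.List.sorted_pairwise xs (fun p => zsHead p)),
      ih, List.filter_append, List.filter_cons, List.filter_nil]

-- the while-loop helper consumes exactly the leading pairs with head f, keeping the last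
theorem zs_take_spec (f : Int) (l : List (List Int)) (ch : Option (List Int)) :
    zsTake f l ch
    = (((l.takeWhile (fun p => zsHead p == f)).getLast?).or ch,
        l.dropWhile (fun p => zsHead p == f)) := by
  induction l generalizing ch with
  | nil => simp [zsTake]
  | cons p t ih =>
    by_cases h : zsHead p = f
    · have hb : (zsHead p == f) = true := by simp [h]
      simp only [zsTake, hb, if_true, List.takeWhile_cons, List.dropWhile_cons, ih]
      congr 1
      cases htw : (t.takeWhile (fun p => zsHead p == f)).getLast? <;>
        simp [List.getLast?_cons, htw, Option.or]
    · have hb : (zsHead p == f) = false := by simp [h]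
      simp [zsTake, hb]

-- MERGE CORRECTNESS: merging the sorted row along the strictly increasing grid gathers,
-- at each grid frequency, the last matching pair (or the zero pair)
theorem zs_merge_eq_map (G : List Int) (sr : List (List Int))
    (hG : G.Pairwise (· < ·))
    (hs : sr.Pairwise (fun a b => zsHead a ≤ zsHead b))
    (hmem : ∀ p ∈ sr, zsHead p ∈ G) :
    zsMerge G sr
    = G.map (fun f => ((sr.filter (fun p => zsHead p == f)).getLast?).getD [f, 0]) := by
  induction G generalizing sr with
  | nil => simp [zsMerge]
  | cons f gs ih =>
    rcases List.pairwise_cons.mp hG with ⟨hfgs, hgs⟩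
    have hrest : ∀ p ∈ sr.dropWhile (fun p => zsHead p == f), f < zsHead p := by
      intro p hp
      cases hdw : sr.dropWhile (fun p => zsHead p == f) with
      | nil => rw [hdw] at hp; cases hp
      | cons q t =>
        rw [hdw] at hp
        have hq : ¬ (zsHead q == f) = true := by
          have := List.head?_dropWhile_not (fun p => zsHead p == f) sr
          rw [hdw] at this; simpa using this
        have hqf : zsHead q ≠ f := by simpa using hq
        have hqG : zsHead q ∈ f :: gs :=
          hmem q ((sr.dropWhile_sublist _).subset (hdw ▸ List.mem_cons_self ..))
        have hfq : f < zsHead q := by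
          rcases List.mem_cons.mp hqG with h | h
          · exact absurd h hqf
          · exact hfgs _ h
        rcases List.mem_cons.mp hp with rfl | hpt
        · exact hfq
        · have hpair : (sr.dropWhile (fun p => zsHead p == f)).Pairwise
              (fun a b => zsHead a ≤ zsHead b) := hs.sublist (sr.dropWhile_sublist _)
          rw [hdw] at hpair
          exact lt_of_lt_of_le hfq ((List.pairwise_cons.mp hpair).1 p hpt)
    have hfilter : sr.filter (fun p => zsHead p == f)
        = sr.takeWhile (fun p => zsHead p == f) := by
      conv_lhs => rw [← List.takeWhile_append_dropWhile (p := fun p => zsHead p == f) (l := sr)]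
      rw [List.filter_append]
      have h1 : (sr.takeWhile (fun p => zsHead p == f)).filter (fun p => zsHead p == f)
          = sr.takeWhile (fun p => zsHead p == f) :=
        List.filter_eq_self.mpr (fun p hp =>
          List.mem_takeWhile_imp (p := fun q => zsHead q == f) (l := sr) hp)
      have h2 : (sr.dropWhile (fun p => zsHead p == f)).filter (fun p => zsHead p == f) = [] :=
        List.filter_eq_nil_iff.mpr (fun p hp => by
          have := hrest p hp; simp only [beq_iff_eq]; omega)
      rw [h1, h2, List.append_nil]
    simp only [zsMerge, zs_take_spec, Option.or_none, List.map_cons]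
    congr 1
    · rw [hfilter]
      cases (sr.takeWhile (fun p => zsHead p == f)).getLast? <;> rfl
    · rw [ih (sr.dropWhile (fun p => zsHead p == f)) hgs
        (hs.sublist (sr.dropWhile_sublist _))
        (fun p hp => by
          have hin : zsHead p ∈ f :: gs := hmem p ((sr.dropWhile_sublist _).subset hp)
          rcases List.mem_cons.mp hin with h | h
          · exact absurd h (by have := hrest p hp; omega)
          · exact h)]
      apply List.map_congr_left
      intro f' hf'
      congr 2
      conv_rhs => rw [← List.takeWhile_append_dropWhile (p := fun p => zsHead p == f) (l := sr)]
      rw [List.filter_append]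
      have : (sr.takeWhile (fun p => zsHead p == f)).filter (fun p => zsHead p == f') = [] :=
        List.filter_eq_nil_iff.mpr (fun p hp => by
          have h1 : (zsHead p == f) = true :=
            List.mem_takeWhile_imp (p := fun q => zsHead q == f) (l := sr) hp
          have h2 : f < f' := hfgs _ hf'
          simp only [beq_iff_eq] at h1 ⊢
          omega)
      rw [this, List.nil_append]

-- ===== VERDICT (by name: the statement is the Claim_ definition above) =====
theorem zeroSupplement_spec : Claim_equal_zeroSupplement := by
  unfold Claim_equal_zeroSupplement
  intro data _ _
  unfold Spec_zeroSupplement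
  simp only [zeroSupplement, zeroSupplement_alt]
  rw [zs_fold_eq_update, PySem.Set.update_nil_left, PySem.Set.ofList_ofList]
  set heads := data.flatMap (fun row => row.map zsHead) with hheads
  set G := PySem.List.sorted (PySem.Set.ofList heads) (fun x => x) false with hG
  have hnd : G.Nodup :=
    (PySem.List.sorted_perm (PySem.Set.ofList heads) (fun x => x) false).symm.nodup
      (PySem.Set.nodup_ofList heads)
  apply List.map_congr_left
  intro row hrow
  have hmemG : ∀ p ∈ row, zsHead p ∈ G := by
    intro p hp
    rw [hG, PySem.List.mem_sorted, PySem.Set.mem_ofList, hheads]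
    exact List.mem_flatMap.mpr ⟨row, hrow, List.mem_map_of_mem hp⟩
  rw [zs_scatter_eq_gather G hnd row hmemG (fun f => [f, 0]) PySem.Dict.empty
    (by intro f _; simp [PySem.Dict.getD_empty])]
  rw [zs_merge_eq_map G (PySem.List.sorted row (fun p => zsHead p) false)
    (hG ▸ PySem.List.sorted_ofList_pairwise_lt heads)
    (PySem.List.sorted_pairwise row (fun p => zsHead p))
    (fun p hp => hmemG p ((PySem.List.mem_sorted ..).mp hp))]
  apply List.map_congr_left
  intro f _
  rw [zs_sorted_filter, zs_getD_foldl_insert, PySem.Dict.getD_empty]
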